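-- pv_equiv track=rewrite | github.com/PurthaShaariyaar/OA | test/p1.py | sameSubtring
-- ===== SOURCE A (Python) =====
-- def sameSubtring(s, t, K):
--   cost = 0
--   left_pointer = 0
--   max_length = 0
--
--   for right_pointer in range(len(s)):
--     cost += abs(ord(s[right_pointer]) - ord(t[right_pointer]))
--
--     while cost > K:
--       cost -= abs(ord(s[left_pointer]) - ord(t[left_pointer]))
--       left_pointer += 1
--
--     max_length = max(max_length, right_pointer - left_pointer + 1)
--
--   return max_length
-- ===== SOURCE B (Python) =====
-- def sameSubtring(s, t, K):
--     # Prefix-cost array: P[i] = total char-distance cost of s[:i] vs t[:i].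
--     P = [0]
--     for i in range(len(s)):
--         P.append(P[-1] + abs(ord(s[i]) - ord(t[i])))
--     best = 0
--     for right in range(len(s)):
--         # smallest left with P[left] >= P[right+1] - K (binary search: P is monotone)
--         target = P[right + 1] - K
--         lo, hi = 0, len(P)
--         while lo < hi:
--             mid = (lo + hi) // 2
--             if P[mid] < target:
--                 lo = mid + 1
--             else:
--                 hi = mid
--         best = max(best, right - lo + 1)
--     return best
-- ===== Notes on version B (the rewrite author's own statement) =====
-- stated objective: alternative
-- what changed: Replaces A's sliding-window with amortized two-pointer shrinking by a prefix-cost array plus a binary search for the smallest qualifying left endpoint of each window.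
-- crash fix: On K < 0 with s nonempty (and len(t) >= len(s)) A's inner while loop never stops and raises IndexError, while B returns 0; inputs with len(t) < len(s) also raise IndexError in both and are excluded by Pre_. — e.g. on sameSubtring("a", "b", -1): A raises IndexError, B returns 0
import Mathlib
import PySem

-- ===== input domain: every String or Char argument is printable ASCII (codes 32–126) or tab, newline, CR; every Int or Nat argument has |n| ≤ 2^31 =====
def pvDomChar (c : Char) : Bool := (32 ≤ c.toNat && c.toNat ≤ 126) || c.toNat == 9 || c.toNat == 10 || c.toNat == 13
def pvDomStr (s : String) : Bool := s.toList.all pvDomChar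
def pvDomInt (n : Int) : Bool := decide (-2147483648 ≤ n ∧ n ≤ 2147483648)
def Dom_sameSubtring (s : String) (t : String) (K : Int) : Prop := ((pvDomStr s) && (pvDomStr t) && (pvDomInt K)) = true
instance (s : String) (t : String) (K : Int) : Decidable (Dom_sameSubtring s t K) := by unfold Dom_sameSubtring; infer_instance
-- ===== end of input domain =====

-- B replaces A's sliding window by a prefix-cost array plus a hand-written binary search
-- for each window's leftmost endpoint (objective: alternative decomposition, not faster);
-- A raises IndexError when len(t) < len(s) or when K < 0 with s nonempty — those inputs
-- are outside Pre_ (B returns 0 on the K < 0 ones, see Raises_).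

-- ===== PORT A =====
-- inner 'while cost > K' loop of A; a failed index lookup (Python IndexError) stops the loop
def aShrink (ss ts : List Char) (K : Int) (cost : Int) (left : Nat) : Nat → Int × Nat
  | 0 => (cost, left)   -- fuel ss.length + 1 is enough: left grows until the lookup fails
  | fuel + 1 =>
    if K < cost then
      match PySem.List.pyGet? ss (left : Int), PySem.List.pyGet? ts (left : Int) with
      | some a, some b =>
          aShrink ss ts K (cost - |((a.toNat : Int) - (b.toNat : Int))|) (left + 1) fuel
      | _, _ => (cost, left)   -- Python raises IndexError here (outside Pre_)
    else (cost, left)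

def sameSubtring (s : String) (t : String) (K : Int) : Int :=
  let ss := s.toList
  let ts := t.toList
  let st := (List.range ss.length).foldl (fun (st : Int × Nat × Int) (r : Nat) =>
    let cost := st.1 + (match PySem.List.pyGet? ss (r : Int), PySem.List.pyGet? ts (r : Int) with
      | some a, some b => |((a.toNat : Int) - (b.toNat : Int))|
      | _, _ => 0)   -- Python raises IndexError here (outside Pre_)
    let res := aShrink ss ts K cost st.2.1 (ss.length + 1)
    (res.1, res.2, max st.2.2 ((r : Int) - (res.2 : Int) + 1))) (0, 0, 0)
  st.2.2

-- ===== PORT B =====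
-- Source B's while-loop binary search on the prefix array
-- Source B's while-loop binary search on the prefix array
def bsearch (P : List Int) (target : Int) (lo hi : Nat) : Nat → Nat
  | 0 => lo   -- fuel P.length is enough: hi - lo shrinks every round
  | fuel + 1 =>
    if lo < hi then
      let mid := (lo + hi) / 2
      if PySem.List.pyGetD P (mid : Int) 0 < target then bsearch P target (mid + 1) hi fuel
      else bsearch P target lo mid fuel
    else lo

def sameSubtring_alt (s : String) (t : String) (K : Int) : Int :=
  let ss := s.toList
  let ts := t.toList
  let P := (List.range ss.length).foldl (fun (P : List Int) (i : Nat) =>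
      P ++ [PySem.List.pyGetD P (-1) 0 +
        (match PySem.List.pyGet? ss (i : Int), PySem.List.pyGet? ts (i : Int) with
          | some a, some b => |((a.toNat : Int) - (b.toNat : Int))|
          | _, _ => 0)]) [0]   -- Python raises IndexError on the match failure (outside Pre_)
  (List.range ss.length).foldl (fun (best : Int) (r : Nat) =>
    let target := PySem.List.pyGetD P ((r : Int) + 1) 0 - K
    let lo := bsearch P target 0 P.length P.length
    max best ((r : Int) - (lo : Int) + 1)) 0

-- ===== PRECONDITION & SPEC =====
-- Pre_ excludes inputs where A raises IndexError: t shorter than s (lookup t[i] fails),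
-- and K < 0 with s nonempty (the inner while never stops and overruns the strings).
def Pre_sameSubtring (s : String) (t : String) (K : Int) : Prop :=
  s.toList.length ≤ t.toList.length ∧ (0 ≤ K ∨ s = "")
instance (s : String) (t : String) (K : Int) : Decidable (Pre_sameSubtring s t K) := by
  unfold Pre_sameSubtring; infer_instance

def pvWitness_sameSubtring : String × String × Int := ("ab", "ac", 1)

-- On K < 0 with s nonempty (and t at least as long as s), A raises IndexError while B returns 0.
def Raises_sameSubtring (s : String) (t : String) (K : Int) : Prop :=
  s.toList.length ≤ t.toList.length ∧ K < 0 ∧ s ≠ ""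
instance (s : String) (t : String) (K : Int) : Decidable (Raises_sameSubtring s t K) := by
  unfold Raises_sameSubtring; infer_instance
def pvRaiseWitness_sameSubtring : String × String × Int := ("a", "b", -1)
def pvRaiseWitnessOut_sameSubtring : Int := 0

def Spec_sameSubtring (s : String) (t : String) (K : Int) (out : Int) : Prop := out = sameSubtring_alt s t K
instance (s : String) (t : String) (K : Int) (out : Int) : Decidable (Spec_sameSubtring s t K out) := by unfold Spec_sameSubtring; infer_instance

-- ===== CLAIM (what is proved, stated in full; the proofs are below) =====
def Claim_equal_sameSubtring : Prop := ∀ (s : String) (t : String) (K : Int), Dom_sameSubtring s t K → Pre_sameSubtring s t K → Spec_sameSubtring s t K (sameSubtring s t K)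
def Claim_raises_sameSubtring : Prop := (∀ (s : String) (t : String) (K : Int), Dom_sameSubtring s t K → Raises_sameSubtring s t K → ¬ Pre_sameSubtring s t K) ∧ (Dom_sameSubtring (pvRaiseWitness_sameSubtring.1) (pvRaiseWitness_sameSubtring.2.1) (pvRaiseWitness_sameSubtring.2.2) ∧ Raises_sameSubtring (pvRaiseWitness_sameSubtring.1) (pvRaiseWitness_sameSubtring.2.1) (pvRaiseWitness_sameSubtring.2.2) ∧ sameSubtring_alt (pvRaiseWitness_sameSubtring.1) (pvRaiseWitness_sameSubtring.2.1) (pvRaiseWitness_sameSubtring.2.2) = pvRaiseWitnessOut_sameSubtring)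

-- ===== LEMMAS AND PROOFS =====

-- prefix cost function: Pf i = cost of the first i character pairs
def Pf (ss ts : List Char) : Nat → Int
  | 0 => 0
  | i + 1 => Pf ss ts i + |(((ss.getD i 'a').toNat : Int) - ((ts.getD i 'a').toNat : Int))|

theorem Pf_mono (ss ts : List Char) {i j : Nat} (h : i ≤ j) : Pf ss ts i ≤ Pf ss ts j := by
  induction j with
  | zero => simp_all
  | succ j ih =>
    have hstep : Pf ss ts j ≤ Pf ss ts (j+1) := by
      have habs : (0:Int) ≤ |(((ss.getD j 'a').toNat : Int) - ((ts.getD j 'a').toNat : Int))| := abs_nonneg _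
      show Pf ss ts j ≤ Pf ss ts j + _
      omega
    rcases Nat.lt_or_ge i (j+1) with hlt | hge
    · exact le_trans (ih (by omega)) hstep
    · have : i = j + 1 := by omega
      simp [this]

-- smallest l with l = n+1 or target ≤ Pf l
def mIdx (ss ts : List Char) (n : Nat) (target : Int) : Nat :=
  Nat.find (p := fun l => n + 1 ≤ l ∨ target ≤ Pf ss ts l) ⟨n + 1, Or.inl le_rfl⟩

theorem mIdx_min (ss ts : List Char) (n : Nat) (target : Int) {l : Nat}
    (h : l < mIdx ss ts n target) : l ≤ n ∧ Pf ss ts l < target := by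
  have := Nat.find_min (p := fun l => n + 1 ≤ l ∨ target ≤ Pf ss ts l) ⟨n + 1, Or.inl le_rfl⟩ h
  push Not at this
  exact ⟨by omega, this.2⟩

theorem mIdx_spec (ss ts : List Char) (n : Nat) (target : Int) :
    n + 1 ≤ mIdx ss ts n target ∨ target ≤ Pf ss ts (mIdx ss ts n target) :=
  Nat.find_spec (p := fun l => n + 1 ≤ l ∨ target ≤ Pf ss ts l) ⟨n + 1, Or.inl le_rfl⟩

theorem mIdx_le_of (ss ts : List Char) (n : Nat) (target : Int) {k : Nat}
    (h : n + 1 ≤ k ∨ target ≤ Pf ss ts k) : mIdx ss ts n target ≤ k :=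
  Nat.find_le h

theorem mIdx_unique (ss ts : List Char) (n : Nat) (target : Int) {r : Nat}
    (hr : r ≤ n + 1) (hlo : ∀ l < r, Pf ss ts l < target)
    (hhi : r = n + 1 ∨ target ≤ Pf ss ts r) : r = mIdx ss ts n target := by
  have hp : n + 1 ≤ r ∨ target ≤ Pf ss ts r := by
    rcases hhi with h | h
    · exact Or.inl (by omega)
    · exact Or.inr h
  have h1 : mIdx ss ts n target ≤ r := mIdx_le_of ss ts n target hp
  rcases Nat.lt_or_ge (mIdx ss ts n target) r with hlt | hge
  · rcases mIdx_spec ss ts n target with h | h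
    · omega
    · have := hlo _ hlt; omega
  · omega

theorem mIdx_mono (ss ts : List Char) (n : Nat) {t1 t2 : Int} (h : t1 ≤ t2) :
    mIdx ss ts n t1 ≤ mIdx ss ts n t2 := by
  apply mIdx_le_of
  rcases mIdx_spec ss ts n t2 with h2 | h2
  · exact Or.inl h2
  · exact Or.inr (le_trans h h2)

theorem bsearch_correct (ss ts : List Char) (n : Nat) (target : Int)
    (P : List Int) (hP : ∀ l, l ≤ n → P.getD l 0 = Pf ss ts l) :
    ∀ fuel lo hi, hi - lo ≤ fuel → lo ≤ hi → hi ≤ n + 1 →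
    (∀ l, l < lo → Pf ss ts l < target) →
    (∀ l, hi ≤ l → l ≤ n → target ≤ Pf ss ts l) →
    bsearch P target lo hi fuel = mIdx ss ts n target := by
  intro fuel
  induction fuel with
  | zero =>
    intro lo hi hd hlh hhi hlo hhiInv
    have hle : lo = hi := by omega
    rw [bsearch]
    apply mIdx_unique ss ts n target (by omega) (fun l hl => hlo l hl)
    rcases Nat.lt_or_ge lo (n + 1) with h | h
    · exact Or.inr (hhiInv lo (by omega) (by omega))
    · exact Or.inl (by omega)
  | succ fuel ih =>
    intro lo hi hd hlh hhi hlo hhiInv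
    rw [bsearch]
    by_cases hlt : lo < hi
    · simp only [hlt, if_true]
      have hmid : (lo + hi) / 2 < hi := by omega
      have hmidlo : lo ≤ (lo + hi) / 2 := by omega
      have hmidn : (lo + hi) / 2 ≤ n := by omega
      have hPg : PySem.List.pyGetD P (((lo + hi) / 2 : Nat) : Int) 0 = Pf ss ts ((lo + hi) / 2) := by
        rw [PySem.List.pyGetD_natCast]; exact hP _ hmidn
      rw [hPg]
      by_cases hcmp : Pf ss ts ((lo + hi) / 2) < target
      · simp only [hcmp, if_true]
        exact ih _ _ (by omega) (by omega) hhi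
          (fun l hl => lt_of_le_of_lt (Pf_mono ss ts (by omega)) hcmp) hhiInv
      · simp only [hcmp, if_false]
        exact ih _ _ (by omega) (by omega) (by omega) hlo
          (fun l hl hln => le_trans (not_lt.mp hcmp) (Pf_mono ss ts hl))
    · simp only [hlt, if_false]
      have hle : lo = hi := by omega
      apply mIdx_unique ss ts n target (by omega) (fun l hl => hlo l hl)
      rcases Nat.lt_or_ge lo (n + 1) with h | h
      · exact Or.inr (hhiInv lo (by omega) (by omega))
      · exact Or.inl (by omega)

theorem shrink_correct (ss ts : List Char) (K : Int) (n : Nat)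
    (hn : n = ss.length) (hts : n ≤ ts.length) (r : Nat) (hr : r < n) :
    ∀ d fuel left, (mIdx ss ts n (Pf ss ts (r+1) - K)) - left = d → d ≤ fuel →
    left ≤ mIdx ss ts n (Pf ss ts (r+1) - K) →
    mIdx ss ts n (Pf ss ts (r+1) - K) ≤ r + 1 →
    aShrink ss ts K (Pf ss ts (r+1) - Pf ss ts left) left fuel =
      (Pf ss ts (r+1) - Pf ss ts (mIdx ss ts n (Pf ss ts (r+1) - K)),
       mIdx ss ts n (Pf ss ts (r+1) - K)) := by
  intro d
  induction d with
  | zero =>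
    intro fuel left hd hf hle hmr
    have heq : left = mIdx ss ts n (Pf ss ts (r+1) - K) := by omega
    have hge : Pf ss ts (r+1) - K ≤ Pf ss ts left := by
      rcases mIdx_spec ss ts n (Pf ss ts (r+1) - K) with h | h
      · omega
      · rw [heq]; exact h
    cases fuel with
    | zero => rw [aShrink, heq]
    | succ fuel => rw [aShrink, if_neg (by omega), heq]
  | succ d ih =>
    intro fuel left hd hf hle hmr
    have hltm : left < mIdx ss ts n (Pf ss ts (r+1) - K) := by omega
    obtain ⟨hln, hPl⟩ := mIdx_min ss ts n (Pf ss ts (r+1) - K) (l := left) hltm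
    have hlen : left < ss.length := by omega
    have hlent : left < ts.length := by omega
    obtain ⟨fuel, rfl⟩ : ∃ f, fuel = f + 1 := ⟨fuel - 1, by omega⟩
    rw [aShrink, if_pos (by omega : K < Pf ss ts (r+1) - Pf ss ts left)]
    rw [PySem.List.pyGet?_natCast, PySem.List.pyGet?_natCast,
      List.getElem?_eq_getElem hlen, List.getElem?_eq_getElem hlent]
    have hstep : Pf ss ts (r+1) - Pf ss ts left - |((ss[left].toNat : Int) - (ts[left].toNat : Int))|
        = Pf ss ts (r+1) - Pf ss ts (left + 1) := by
      have hPf : Pf ss ts (left + 1) = Pf ss ts left + |(((ss.getD left 'a').toNat : Int) - ((ts.getD left 'a').toNat : Int))| := rfl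
      rw [hPf, List.getD_eq_getElem ss 'a' hlen, List.getD_eq_getElem ts 'a' hlent]
      ring
    simp only []
    rw [hstep]
    exact ih fuel (left + 1) (by omega) (by omega) (by omega) hmr

-- canonical result after r rounds
def canon (ss ts : List Char) (n : Nat) (K : Int) : Nat → Int
  | 0 => 0
  | r + 1 => max (canon ss ts n K r)
      ((r : Int) - (mIdx ss ts n (Pf ss ts (r+1) - K) : Int) + 1)

theorem mIdx_le_succ_r (ss ts : List Char) (n : Nat) (K : Int) (hK : 0 ≤ K) (r : Nat) :
    mIdx ss ts n (Pf ss ts (r+1) - K) ≤ r + 1 :=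
  mIdx_le_of ss ts n _ (Or.inr (by omega))

theorem aLoop_correct (ss ts : List Char) (K : Int) (hK : 0 ≤ K)
    (hts : ss.length ≤ ts.length) :
    ∀ r, r ≤ ss.length →
    (List.range r).foldl (fun (st : Int × Nat × Int) (r : Nat) =>
      let cost := st.1 + (match PySem.List.pyGet? ss (r : Int), PySem.List.pyGet? ts (r : Int) with
        | some a, some b => |((a.toNat : Int) - (b.toNat : Int))|
        | _, _ => 0)
      let res := aShrink ss ts K cost st.2.1 (ss.length + 1)
      (res.1, res.2, max st.2.2 ((r : Int) - (res.2 : Int) + 1))) (0, 0, 0)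
    = (Pf ss ts r - Pf ss ts (mIdx ss ts ss.length (Pf ss ts r - K)),
       mIdx ss ts ss.length (Pf ss ts r - K),
       canon ss ts ss.length K r) := by
  intro r
  induction r with
  | zero =>
    intro _
    have h0 : mIdx ss ts ss.length (-K) = 0 := by
      have h1 := mIdx_le_of ss ts ss.length (-K) (k := 0) (Or.inr (by simp [Pf]; omega))
      omega
    simp [Pf, canon, h0]
  | succ r ih =>
    intro hr
    rw [List.range_succ, List.foldl_append, ih (by omega)]
    simp only [List.foldl_cons, List.foldl_nil]
    have hrlen : r < ss.length := by omega
    have hrlent : r < ts.length := by omega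
    rw [PySem.List.pyGet?_natCast, PySem.List.pyGet?_natCast,
      List.getElem?_eq_getElem hrlen, List.getElem?_eq_getElem hrlent]
    simp only []
    have hcost : Pf ss ts r - Pf ss ts (mIdx ss ts ss.length (Pf ss ts r - K)) +
        |((ss[r].toNat : Int) - (ts[r].toNat : Int))|
        = Pf ss ts (r+1) - Pf ss ts (mIdx ss ts ss.length (Pf ss ts r - K)) := by
      have : Pf ss ts (r + 1) = Pf ss ts r + |(((ss.getD r 'a').toNat : Int) - ((ts.getD r 'a').toNat : Int))| := rfl
      rw [this, List.getD_eq_getElem ss 'a' hrlen, List.getD_eq_getElem ts 'a' hrlent]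
      ring
    rw [hcost]
    have hmono : mIdx ss ts ss.length (Pf ss ts r - K) ≤ mIdx ss ts ss.length (Pf ss ts (r+1) - K) := by
      apply mIdx_mono
      have : Pf ss ts r ≤ Pf ss ts (r+1) := Pf_mono ss ts (by omega)
      omega
    have hm1 := mIdx_le_succ_r ss ts ss.length K hK r
    have hsh := shrink_correct ss ts K ss.length rfl hts r hrlen
      (mIdx ss ts ss.length (Pf ss ts (r+1) - K) - mIdx ss ts ss.length (Pf ss ts r - K))
      (ss.length + 1) (mIdx ss ts ss.length (Pf ss ts r - K)) rfl (by omega) hmono hm1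
    rw [hsh]
    simp [canon]

-- the prefix list B builds is the map of Pf over range (n+1)
theorem Pbuild (ss ts : List Char) (hts : ss.length ≤ ts.length) :
    ∀ m, m ≤ ss.length →
    (List.range m).foldl (fun (P : List Int) (i : Nat) =>
      P ++ [PySem.List.pyGetD P (-1) 0 +
        (match PySem.List.pyGet? ss (i : Int), PySem.List.pyGet? ts (i : Int) with
          | some a, some b => |((a.toNat : Int) - (b.toNat : Int))|
          | _, _ => 0)]) [0]
    = (List.range (m + 1)).map (Pf ss ts) := by
  intro m
  induction m with
  | zero => simp [Pf]
  | succ m ih =>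
    intro hm
    rw [List.range_succ, List.foldl_append, ih (by omega)]
    simp only [List.foldl_cons, List.foldl_nil]
    have hmlen : m < ss.length := by omega
    have hmlent : m < ts.length := by omega
    rw [PySem.List.pyGet?_natCast, PySem.List.pyGet?_natCast,
      List.getElem?_eq_getElem hmlen, List.getElem?_eq_getElem hmlent]
    have hlast : PySem.List.pyGetD ((List.range (m + 1)).map (Pf ss ts)) (-1) 0 = Pf ss ts m := by
      rw [List.range_succ, List.map_append]
      exact PySem.List.pyGetD_neg_one_append_singleton _ _ _
    rw [hlast]
    simp only []
    have hval : Pf ss ts m + |((ss[m].toNat : Int) - (ts[m].toNat : Int))| = Pf ss ts (m + 1) := by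
      have : Pf ss ts (m + 1) = Pf ss ts m + |(((ss.getD m 'a').toNat : Int) - ((ts.getD m 'a').toNat : Int))| := rfl
      rw [this, List.getD_eq_getElem ss 'a' hmlen, List.getD_eq_getElem ts 'a' hmlent]
    rw [hval, List.range_succ (n := m + 1), List.map_append, List.map_singleton]

theorem bLoop_correct (ss ts : List Char) (K : Int) :
    ∀ r, r ≤ ss.length →
    (List.range r).foldl (fun (best : Int) (r : Nat) =>
      let target := PySem.List.pyGetD ((List.range (ss.length + 1)).map (Pf ss ts)) ((r : Int) + 1) 0 - K
      let lo := bsearch ((List.range (ss.length + 1)).map (Pf ss ts)) target 0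
        ((List.range (ss.length + 1)).map (Pf ss ts)).length ((List.range (ss.length + 1)).map (Pf ss ts)).length
      max best ((r : Int) - (lo : Int) + 1)) 0
    = canon ss ts ss.length K r := by
  have hP : ∀ l, l ≤ ss.length → ((List.range (ss.length + 1)).map (Pf ss ts)).getD l 0 = Pf ss ts l := by
    intro l hl
    rw [List.getD_eq_getElem?_getD, List.getElem?_map, List.getElem?_range (by omega)]
    rfl
  have hlen : ((List.range (ss.length + 1)).map (Pf ss ts)).length = ss.length + 1 := by simp
  intro r
  induction r with
  | zero => simp [canon]
  | succ r ih =>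
    intro hr
    rw [show List.range (r + 1) = List.range r ++ [r] from List.range_succ, List.foldl_append, ih (by omega)]
    simp only [List.foldl_cons, List.foldl_nil]
    have htgt : PySem.List.pyGetD ((List.range (ss.length + 1)).map (Pf ss ts)) ((r : Int) + 1) 0 = Pf ss ts (r + 1) := by
      have : ((r : Nat) : Int) + 1 = (((r + 1 : Nat)) : Int) := by push_cast; ring
      rw [this, PySem.List.pyGetD_natCast]
      exact hP (r + 1) (by omega)
    rw [htgt, hlen]
    have hbs := bsearch_correct ss ts ss.length (Pf ss ts (r + 1) - K) _ hP
      (ss.length + 1) 0 (ss.length + 1) (by omega) (by omega) le_rfl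
      (by omega) (by omega)
    rw [hbs]
    simp [canon]

theorem main_eq (s t : String) (K : Int) (h : Pre_sameSubtring s t K) :
    sameSubtring s t K = sameSubtring_alt s t K := by
  obtain ⟨hlen, hK⟩ := h
  rcases hK with hK | hK
  · unfold sameSubtring sameSubtring_alt
    simp only []
    rw [aLoop_correct s.toList t.toList K hK hlen s.toList.length le_rfl]
    rw [Pbuild s.toList t.toList hlen s.toList.length le_rfl]
    rw [bLoop_correct s.toList t.toList K s.toList.length le_rfl]
  · subst hK
    rfl

-- ===== VERDICT (by name: the statement is the Claim_ definition above) =====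
theorem sameSubtring_spec : Claim_equal_sameSubtring := by
  intro s t K _ hPre
  unfold Spec_sameSubtring
  exact main_eq s t K hPre

@[simp] theorem sameSubtring_raises : Claim_raises_sameSubtring := by
  unfold Claim_raises_sameSubtring
  constructor
  · intro s t K _ hR hPre
    obtain ⟨_, hKneg, hne⟩ := hR
    obtain ⟨_, h⟩ := hPre
    rcases h with h | h
    · omega
    · exact hne h
  · exact ⟨by decide, by decide, by decide⟩
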